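-- pv_equiv track=rewrite | github.com/rokker1/python_yandex_handbook | 3.Collections/3.5.iostream/tasks/l.py | check_dacimal
-- ===== SOURCE A (Python) =====
-- def check_dacimal(decimal):
--     even = 0
--     odd = 0
--     d = int(decimal)
--     while d > 0:
--         if (d % 10) % 2 == 1:
--             odd += 1
--         else:
--             even += 1
--         d //= 10
--
--     if even > odd:
--         return "even"
--     elif even < odd:
--         return "odd"
--     else:
--         return "eq"
-- ===== SOURCE B (Python) =====
-- def check_dacimal(decimal):
--     d = int(decimal)
--     s = str(d) if d > 0 else ''
--     even = sum(c in '02468' for c in s)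
--     odd = len(s) - even
--     if even > odd:
--         return "even"
--     if even < odd:
--         return "odd"
--     return "eq"
-- ===== Notes on version B (the rewrite author's own statement) =====
-- stated objective: idiomatic
-- what changed: B classifies the characters of the decimal string str(d) against the even-digit characters instead of peeling digits with modulo/floor-division in a while loop, and derives the odd count as the string length minus the even count.
import Mathlib
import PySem

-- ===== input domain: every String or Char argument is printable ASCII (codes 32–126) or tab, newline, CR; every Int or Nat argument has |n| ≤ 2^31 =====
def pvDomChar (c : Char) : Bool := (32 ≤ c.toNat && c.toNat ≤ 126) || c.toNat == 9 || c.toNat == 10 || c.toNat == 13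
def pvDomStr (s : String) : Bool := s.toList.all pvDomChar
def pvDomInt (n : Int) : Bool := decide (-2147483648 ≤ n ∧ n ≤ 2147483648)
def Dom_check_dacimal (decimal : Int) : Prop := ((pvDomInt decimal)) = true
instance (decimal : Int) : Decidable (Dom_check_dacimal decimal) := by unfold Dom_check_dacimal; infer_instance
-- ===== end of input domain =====

-- B counts even digits among the characters of str(d) (only for d > 0, as A's while loop runs only there)
-- instead of peeling digits with %10 and //10; same cost, more idiomatic.


-- ===== PORT A =====
-- termination helper for the while loop: d //= 10 strictly shrinks a positive d
theorem pvFloordivTen_toNat_lt (d : Int) (h : 0 < d) :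
    (PySem.Int.floordiv d 10).toNat < d.toNat := by
  have h1 : PySem.Int.floordiv d 10 < d :=
    (PySem.Int.floordiv_lt_iff_lt_mul (a:=d) (b:=10) (q:=d) (by norm_num)).mpr (by nlinarith)
  omega

-- the while loop of A, on state (d, even, odd)
def pvLoopA (d even odd : Int) : Int × Int :=
  if h : 0 < d then
    if PySem.Int.mod (PySem.Int.mod d 10) 2 = 1 then
      pvLoopA (PySem.Int.floordiv d 10) even (odd + 1)
    else
      pvLoopA (PySem.Int.floordiv d 10) (even + 1) odd
  else (even, odd)
termination_by d.toNat
decreasing_by all_goals exact pvFloordivTen_toNat_lt d h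

def check_dacimal (decimal : Int) : String :=
  let eo := pvLoopA decimal 0 0
  if eo.1 > eo.2 then "even" else if eo.1 < eo.2 then "odd" else "eq"

-- ===== PORT B =====
def check_dacimal_alt (decimal : Int) : String :=
  let s : List Char := if decimal > 0 then (PySem.Int.toStr decimal).toList else []
  let even : Nat := s.countP (fun c => ['0', '2', '4', '6', '8'].contains c)
  let odd : Nat := s.length - even
  if even > odd then "even" else if even < odd then "odd" else "eq"

-- ===== PRECONDITION & SPEC =====
def Spec_check_dacimal (decimal : Int) (out : String) : Prop := out = check_dacimal_alt decimal
instance (decimal : Int) (out : String) : Decidable (Spec_check_dacimal decimal out) := by unfold Spec_check_dacimal; infer_instance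

-- ===== CLAIM (what is proved, stated in full; the proofs are below) =====
def Claim_equal_check_dacimal : Prop := ∀ (decimal : Int), Dom_check_dacimal decimal → Spec_check_dacimal decimal (check_dacimal decimal)

-- ===== LEMMAS AND PROOFS =====

-- even/odd digit counts of n, as specifications
def pvCE (n : Nat) : Nat := (Nat.digits 10 n).countP (fun d => d % 2 = 0)
def pvCO (n : Nat) : Nat := (Nat.digits 10 n).countP (fun d => d % 2 = 1)

theorem pvCE_add_pvCO (n : Nat) : pvCE n + pvCO n = (Nat.digits 10 n).length := by
  unfold pvCE pvCO
  have := List.length_eq_countP_add_countP (l := Nat.digits 10 n) (p := fun d => decide (d % 2 = 0))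
  simp only [this]
  congr 1
  apply List.countP_congr
  intro d _
  simp only [decide_eq_true_eq, decide_not, Bool.not_eq_true', decide_eq_false_iff_not]
  omega

-- A's loop computes the even/odd digit counts
theorem pvLoopA_eq (n : Nat) : ∀ (d even odd : Int), 0 < d → d.toNat = n →
    pvLoopA d even odd = (even + pvCE n, odd + pvCO n) := by
  induction n using Nat.strong_induction_on with
  | _ n ih =>
    intro d even odd hd hn
    rw [pvLoopA]
    have h10 : (0:Int) < 10 := by norm_num
    have hmod : PySem.Int.mod d 10 = d % 10 := by
      exact PySem.Int.mod_eq_emod_of_pos h10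
    have hdig : Nat.digits 10 n = n % 10 :: Nat.digits 10 (n / 10) :=
      Nat.digits_def' (by norm_num) (by omega)
    have hfd : PySem.Int.floordiv d 10 = d / 10 := PySem.Int.floordiv_eq_ediv_of_pos h10
    have hq : (d / 10).toNat = n / 10 := by omega
    have hm : (d % 10) % 2 = (n % 10 % 2 : Nat) := by omega
    by_cases hq0 : 0 < d / 10
    · have ihq := fun e o => ih (n / 10) (by omega) (d / 10) e o hq0 hq
      by_cases ho : (n % 10) % 2 = 1
      · have : PySem.Int.mod (PySem.Int.mod d 10) 2 = 1 := by
          rw [hmod]; rw [PySem.Int.mod_eq_emod_of_pos (by norm_num : (0:Int) < 2)]; omega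
        rw [dif_pos hd, if_pos this, hfd, ihq]
        unfold pvCE pvCO
        rw [hdig]
        simp [ho]
        omega
      · have : ¬ PySem.Int.mod (PySem.Int.mod d 10) 2 = 1 := by
          rw [hmod]; rw [PySem.Int.mod_eq_emod_of_pos (by norm_num : (0:Int) < 2)]; omega
        rw [dif_pos hd, if_neg this, hfd, ihq]
        unfold pvCE pvCO
        rw [hdig]
        have he : n % 10 % 2 = 0 := by omega
        simp [he]
        omega
    · -- last digit: d / 10 = 0, loop terminates next round
      have hdig0 : Nat.digits 10 (n / 10) = [] := by
        have : n / 10 = 0 := by omega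
        rw [this]; simp
      by_cases ho : (n % 10) % 2 = 1
      · have : PySem.Int.mod (PySem.Int.mod d 10) 2 = 1 := by
          rw [hmod]; rw [PySem.Int.mod_eq_emod_of_pos (by norm_num : (0:Int) < 2)]; omega
        rw [dif_pos hd, if_pos this, hfd, pvLoopA, dif_neg (by omega)]
        unfold pvCE pvCO
        rw [hdig, hdig0]
        simp [ho]
      · have : ¬ PySem.Int.mod (PySem.Int.mod d 10) 2 = 1 := by
          rw [hmod]; rw [PySem.Int.mod_eq_emod_of_pos (by norm_num : (0:Int) < 2)]; omega
        rw [dif_pos hd, if_neg this, hfd, pvLoopA, dif_neg (by omega)]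
        unfold pvCE pvCO
        rw [hdig, hdig0]
        have he : n % 10 % 2 = 0 := by omega
        simp [he]

-- an even-digit character test agrees with evenness of the digit (digits are < 10)
theorem pvDigitChar_even (d : Nat) (hd : d < 10) :
    (['0', '2', '4', '6', '8'].contains (Nat.digitChar d)) = decide (d % 2 = 0) := by
  interval_cases d <;> decide

-- core counting lemma for Nat.toDigitsCore
theorem pvToDigitsCore_countP (p : Char → Bool) :
    ∀ (fuel n : Nat) (ds : List Char), 0 < n → n ≤ fuel →
    (Nat.toDigitsCore 10 fuel n ds).countP p
      = (Nat.digits 10 n).countP (fun d => p (Nat.digitChar d)) + ds.countP p := by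
  intro fuel
  induction fuel with
  | zero => intro n ds hn hf; omega
  | succ f ihf =>
    intro n ds hn hf
    rw [Nat.toDigitsCore]
    have hdig : Nat.digits 10 n = n % 10 :: Nat.digits 10 (n / 10) :=
      Nat.digits_def' (by norm_num) hn
    by_cases h0 : n / 10 = 0
    · rw [if_pos h0, hdig, h0]
      simp [List.countP_cons]
      by_cases hp : p (Nat.digitChar (n % 10)) <;> simp [hp] <;> omega
    · rw [if_neg h0]
      rw [ihf (n / 10) _ (by omega) (by omega)]
      rw [hdig]
      simp [List.countP_cons]
      by_cases hp : p (Nat.digitChar (n % 10)) <;> simp [hp] <;> omega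

-- countP over the decimal string = digit-count specs
theorem pvToDigits_counts (n : Nat) (hn : 0 < n) :
    (Nat.toDigits 10 n).countP (fun c => ['0', '2', '4', '6', '8'].contains c) = pvCE n ∧
    (Nat.toDigits 10 n).length = pvCE n + pvCO n := by
  unfold Nat.toDigits
  constructor
  · rw [pvToDigitsCore_countP _ (n + 1) n [] hn (by omega)]
    simp only [List.countP_nil, Nat.add_zero]
    unfold pvCE
    apply List.countP_congr
    intro d hd
    rw [pvDigitChar_even d (Nat.digits_lt_base (by norm_num) hd)]
  · rw [pvCE_add_pvCO]
    have := pvToDigitsCore_countP (fun _ => true) (n + 1) n [] hn (by omega)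
    simpa using this

-- toChars of a positive Int is Nat.toDigits of its toNat
theorem pvToChars_pos (d : Int) (h : 0 < d) :
    PySem.Int.toChars d = Nat.toDigits 10 d.toNat := by
  unfold PySem.Int.toChars
  rw [if_neg (by omega)]

-- ===== VERDICT (by name: the statement is the Claim_ definition above) =====
theorem check_dacimal_spec : Claim_equal_check_dacimal := by
  intro decimal _
  unfold Spec_check_dacimal check_dacimal check_dacimal_alt
  by_cases hd : 0 < decimal
  · have hn : 0 < decimal.toNat := by omega
    rw [pvLoopA_eq decimal.toNat decimal 0 0 hd rfl]
    have hs : (PySem.Int.toStr decimal).toList = Nat.toDigits 10 decimal.toNat := by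
      rw [PySem.Int.toList_toStr, pvToChars_pos decimal hd]
    obtain ⟨hc, hl⟩ := pvToDigits_counts decimal.toNat hn
    simp only [if_pos hd, hs, hc, hl]
    have hsub : pvCE decimal.toNat + pvCO decimal.toNat - pvCE decimal.toNat
        = pvCO decimal.toNat := by omega
    rw [hsub]
    simp only [Int.zero_add]
    by_cases h1 : pvCE decimal.toNat > pvCO decimal.toNat
    · rw [if_pos (by exact_mod_cast h1), if_pos h1]
    · rw [if_neg (by exact_mod_cast h1), if_neg h1]
      by_cases h2 : pvCE decimal.toNat < pvCO decimal.toNat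
      · rw [if_pos (by exact_mod_cast h2), if_pos h2]
      · rw [if_neg (by exact_mod_cast h2), if_neg h2]
  · rw [pvLoopA, dif_neg hd]
    simp [hd]
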